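-- pv_equiv track=rewrite | github.com/hltcoe/sandle | backend-hf/serve-backend-hf.py | truncate_at_stops
-- ===== SOURCE A (Python) =====
-- from typing import Any, cast, Dict, Iterable, List, NamedTuple, Optional, Tuple, Union
--
-- def truncate_at_stops(text: str, stop_strings: List[str]) -> Tuple[str, bool]:
--     truncated = False
--     for s in stop_strings:
--         index = text.find(s)
--         if index >= 0:
--             text = text[:index]
--             truncated = True
--     return (text, truncated)
-- ===== SOURCE B (Python) =====
-- def truncate_at_stops(text, stop_strings):
--     # Mutation-free: keep only an optional cut index, search the original text
--     # with a bounded find, and slice exactly once at the end.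
--     cut = None
--     for s in stop_strings:
--         i = text.find(s) if cut is None else text.find(s, 0, cut)
--         if i != -1:
--             cut = i
--     return (text, False) if cut is None else (text[:cut], True)
-- ===== Notes on version B (the rewrite author's own statement) =====
-- stated objective: alternative
-- what changed: Replaces A's loop that repeatedly truncates (copies) the text and threads a boolean flag with a mutation-free pass that only maintains an optional cut index via bounded find on the original text and slices exactly once at the end.
import Mathlib
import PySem

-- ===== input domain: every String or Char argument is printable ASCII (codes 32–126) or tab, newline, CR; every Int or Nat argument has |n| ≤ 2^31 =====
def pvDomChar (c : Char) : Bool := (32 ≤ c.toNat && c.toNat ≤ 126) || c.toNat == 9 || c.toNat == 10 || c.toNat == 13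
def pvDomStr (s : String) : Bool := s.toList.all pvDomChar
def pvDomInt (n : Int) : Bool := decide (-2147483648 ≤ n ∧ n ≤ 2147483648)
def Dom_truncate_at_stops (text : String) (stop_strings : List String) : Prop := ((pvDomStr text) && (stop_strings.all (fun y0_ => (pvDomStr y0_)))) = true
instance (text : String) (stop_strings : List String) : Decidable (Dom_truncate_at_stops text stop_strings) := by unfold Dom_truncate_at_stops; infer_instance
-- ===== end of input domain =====

-- B replaces A's loop that repeatedly truncates the text and threads a boolean flag by a
-- mutation-free pass keeping an optional cut index (bounded find) with one final slice.


-- ===== PORT A =====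
def truncate_at_stops (text : String) (stop_strings : List String) : String × Bool :=
  stop_strings.foldl
    (fun st s =>
      let index := PySem.Str.find st.1 s
      if index ≥ 0 then (PySem.Str.slice st.1 none (some index), true) else st)
    (text, false)

-- ===== PORT B =====
def truncate_at_stops_alt (text : String) (stop_strings : List String) : String × Bool :=
  let cut := stop_strings.foldl
    (fun (cut : Option Int) s =>
      let i := match cut with
        | none => PySem.Str.find text s
        | some c => PySem.Str.findFrom text s 0 (some c)
      if i ≠ -1 then some i else cut)
    none
  match cut with
  | none => (text, false)
  | some c => (PySem.Str.slice text none (some c), true)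

-- ===== PRECONDITION & SPEC =====
def Spec_truncate_at_stops (text : String) (stop_strings : List String) (out : String × Bool) : Prop := out = truncate_at_stops_alt text stop_strings
instance (text : String) (stop_strings : List String) (out : String × Bool) : Decidable (Spec_truncate_at_stops text stop_strings out) := by unfold Spec_truncate_at_stops; infer_instance

-- ===== CLAIM (what is proved, stated in full; the proofs are below) =====
def Claim_equal_truncate_at_stops : Prop := ∀ (text : String) (stop_strings : List String), Dom_truncate_at_stops text stop_strings → Spec_truncate_at_stops text stop_strings (truncate_at_stops text stop_strings)

-- ===== LEMMAS AND PROOFS =====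

/-- B's optional cut index read back as A's loop state. -/
def pvRepr (text : String) (cut : Option Int) : String × Bool :=
  match cut with
  | none => (text, false)
  | some c => (PySem.Str.slice text none (some c), true)

lemma find_go_cases (sub : List Char) : ∀ (cs : List Char) (k : Nat),
    PySem.Chars.find.go sub cs k = -1 ∨
      ((k : Int) ≤ PySem.Chars.find.go sub cs k ∧
        PySem.Chars.find.go sub cs k ≤ (k : Int) + cs.length) := by
  intro cs
  induction cs with
  | nil =>
    intro k; unfold PySem.Chars.find.go
    by_cases h : sub.isEmpty <;> simp [h]
  | cons c cs ih =>
    intro k; unfold PySem.Chars.find.go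
    by_cases h : sub.isPrefixOf (c :: cs)
    · simp only [h, if_true]
      right
      constructor
      · exact le_refl _
      · simp only [List.length_cons]; push_cast; omega
    · simp only [h, if_false, Bool.false_eq_true]
      rcases ih (k + 1) with h1 | ⟨h1, h2⟩
      · exact Or.inl h1
      · right
        constructor
        · push_cast at h1 ⊢; omega
        · simp only [List.length_cons] at *; push_cast at h2 ⊢; omega

/-- s.find(sub): either -1 or an index between 0 and len(s). -/
lemma find_cases (cs sub : List Char) :
    PySem.Chars.find cs sub = -1 ∨
      (0 ≤ PySem.Chars.find cs sub ∧ PySem.Chars.find cs sub ≤ cs.length) := by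
  have := find_go_cases sub cs 0
  simpa [PySem.Chars.find] using this

/-- s.find(sub, 0, e) is find on the prefix of length e (0 ≤ e). -/
lemma findFrom_zero_some (cs sub : List Char) (e : Int) (he : 0 ≤ e) :
    PySem.Chars.findFrom cs sub 0 (some e) = PySem.Chars.find (cs.take e.toNat) sub := by
  unfold PySem.Chars.findFrom
  norm_num
  by_cases h : (cs.length : Int) < e
  · rw [if_pos h, List.take_of_length_le (by simp), List.take_of_length_le (by omega),
      if_neg (by omega : ¬ (cs.length : Int) < 0)]
    split <;> simp_all
  · simp only [if_neg h, if_neg (show ¬ e < (0:Int) by omega)]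
    split <;> simp_all

lemma toList_slice_to (text : String) (c : Int) (hc : 0 ≤ c) :
    (PySem.Str.slice text none (some c)).toList = text.toList.take c.toNat := by
  rw [PySem.Str.toList_slice, PySem.Chars.slice_eq_listSlice, PySem.List.slice_to _ hc]

/-- B's fold, read through pvRepr, is A's fold (index bounds carried as an invariant). -/
lemma loop_eq (text : String) (stop_strings : List String) :
    ∀ (cut : Option Int), (∀ c ∈ cut, 0 ≤ c ∧ c ≤ text.toList.length) →
      stop_strings.foldl
        (fun st s =>
          let index := PySem.Str.find st.1 s
          if index ≥ 0 then (PySem.Str.slice st.1 none (some index), true) else st)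
        (pvRepr text cut)
      = pvRepr text
          (stop_strings.foldl
            (fun (cut : Option Int) s =>
              let i := match cut with
                | none => PySem.Str.find text s
                | some c => PySem.Str.findFrom text s 0 (some c)
              if i ≠ -1 then some i else cut)
            cut) := by
  induction stop_strings with
  | nil => intro cut _; rfl
  | cons s rest ih =>
    intro cut hv
    simp only [List.foldl_cons]
    cases cut with
    | none =>
      show rest.foldl _
          (if PySem.Str.find text s ≥ 0
            then (PySem.Str.slice text none (some (PySem.Str.find text s)), true)
            else (text, false)) = _
      rcases find_cases text.toList s.toList with hf | ⟨h0, h1⟩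
      · rw [if_neg (by rw [PySem.Str.find_eq, hf]; omega)]
        rw [show (if PySem.Str.find text s ≠ -1 then some (PySem.Str.find text s) else none)
              = none by rw [PySem.Str.find_eq, hf]; simp]
        exact ih none hv
      · rw [if_pos (by rw [PySem.Str.find_eq]; omega)]
        rw [show (if PySem.Str.find text s ≠ -1 then some (PySem.Str.find text s) else none)
              = some (PySem.Str.find text s) by rw [PySem.Str.find_eq]; simp; omega]
        exact ih (some (PySem.Str.find text s))
          (by intro x hx; simp at hx; subst hx; exact ⟨h0, h1⟩)
    | some c =>
      obtain ⟨hc0, hc1⟩ := hv c (by simp)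
      have hfind : PySem.Str.find (PySem.Str.slice text none (some c)) s
          = PySem.Str.findFrom text s 0 (some c) := by
        rw [PySem.Str.find_eq, PySem.Str.findFrom_eq, toList_slice_to text c hc0,
          findFrom_zero_some _ _ _ hc0]
      show rest.foldl _
          (if PySem.Str.find (PySem.Str.slice text none (some c)) s ≥ 0
            then (PySem.Str.slice (PySem.Str.slice text none (some c)) none
                    (some (PySem.Str.find (PySem.Str.slice text none (some c)) s)), true)
            else (PySem.Str.slice text none (some c), true)) = _
      rcases find_cases (text.toList.take c.toNat) s.toList with hf | ⟨h0, h1⟩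
      · have hfneg : PySem.Str.find (PySem.Str.slice text none (some c)) s = -1 := by
          rw [PySem.Str.find_eq, toList_slice_to text c hc0, hf]
        rw [if_neg (by rw [hfneg]; omega)]
        rw [show (if PySem.Str.findFrom text s 0 (some c) ≠ -1
              then some (PySem.Str.findFrom text s 0 (some c)) else some c)
              = some c by rw [← hfind, hfneg]; simp]
        exact ih (some c) hv
      · set i := PySem.Chars.find (text.toList.take c.toNat) s.toList with hi
        have hfi : PySem.Str.find (PySem.Str.slice text none (some c)) s = i := by
          rw [PySem.Str.find_eq, toList_slice_to text c hc0]
        have hic : i ≤ c := le_trans h1 (by simp; omega)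
        have hslice : PySem.Str.slice (PySem.Str.slice text none (some c)) none (some i)
            = PySem.Str.slice text none (some i) := by
          apply String.toList_inj.mp
          rw [toList_slice_to _ i h0, toList_slice_to text c hc0, toList_slice_to text i h0,
            List.take_take]
          congr 1
          omega
        rw [if_pos (by rw [hfi]; omega), hfi, hslice]
        rw [show (if PySem.Str.findFrom text s 0 (some c) ≠ -1
              then some (PySem.Str.findFrom text s 0 (some c)) else some c)
              = some i by rw [← hfind, hfi]; simp; omega]
        exact ih (some i)
          (by intro x hx; simp at hx; subst hx
              refine ⟨h0, le_trans h1 ?_⟩; simp)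

-- ===== VERDICT (by name: the statement is the Claim_ definition above) =====
theorem truncate_at_stops_spec : Claim_equal_truncate_at_stops := by
  intro text stop_strings _
  unfold Spec_truncate_at_stops truncate_at_stops truncate_at_stops_alt
  have h := loop_eq text stop_strings none (by simp)
  rw [show pvRepr text none = (text, false) from rfl] at h
  rw [h]
  rfl
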